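-- pv_equiv track=rewrite | github.com/yukishinohara/projects | topcoder/srm679/ListeningSongs.py | listen
-- ===== SOURCE A (Python) =====
-- def listen(durations1, durations2, minutes, T):
--     remain = minutes*60
--     d1 = list(durations1)
--     d2 = list(durations2)
--     ans = 0
--     for t in range(T):
--         if len(d1) <= 0 or len(d2) <= 0:
--             return -1
--         s1, s2 = min(d1), min(d2)
--         remain -= (s1 + s2)
--         ans += 2
--         if remain < 0:
--             return -1
--         d1.remove(s1)
--         d2.remove(s2)
--     d1.extend(d2)
--     while len(d1) > 0:
--         s1 = min(d1)
--         remain -= s1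
--         if remain < 0:
--             return ans
--         ans += 1
--         d1.remove(s1)
--
--     return ans
-- ===== SOURCE B (Python) =====
-- def listen(durations1, durations2, minutes, T):
--     remain = minutes * 60
--     s1 = sorted(durations1)
--     s2 = sorted(durations2)
--     n = max(T, 0)
--     if len(s1) < n or len(s2) < n:
--         return -1
--     for a, b in zip(s1[:n], s2[:n]):
--         remain -= a + b
--         if remain < 0:
--             return -1
--     ans = 2 * n
--     for d in sorted(s1[n:] + s2[n:]):
--         if remain - d < 0:
--             return ans
--         remain -= d
--         ans += 1
--     return ans
-- ===== Notes on version B (the rewrite author's own statement) =====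
-- stated objective: faster
-- what changed: replaces A's repeated min()+list.remove() scans (quadratic selection sort in disguise) by sorting both lists once, consuming the length-T prefixes pairwise and then sweeping the sorted merged remainder
import Mathlib
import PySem

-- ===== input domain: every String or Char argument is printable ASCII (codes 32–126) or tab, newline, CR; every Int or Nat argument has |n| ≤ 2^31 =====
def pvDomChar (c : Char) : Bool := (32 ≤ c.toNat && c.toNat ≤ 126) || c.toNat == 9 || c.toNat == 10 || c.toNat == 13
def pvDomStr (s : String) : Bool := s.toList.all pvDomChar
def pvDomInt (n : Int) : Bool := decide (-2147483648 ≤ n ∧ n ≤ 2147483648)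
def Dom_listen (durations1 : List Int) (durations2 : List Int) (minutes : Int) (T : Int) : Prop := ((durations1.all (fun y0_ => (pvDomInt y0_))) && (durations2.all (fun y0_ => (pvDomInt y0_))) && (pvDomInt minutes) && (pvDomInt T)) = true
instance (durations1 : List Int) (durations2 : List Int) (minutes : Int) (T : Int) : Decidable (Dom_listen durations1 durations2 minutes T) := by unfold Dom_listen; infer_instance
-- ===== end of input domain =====

-- B sorts each list once and sweeps prefix sums instead of A's repeated min()+remove() scans;
-- equivalence of the RETURN value is proved (A copies its arguments, so neither mutates the caller's lists).

-- ===== PORT A =====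

-- termination helper for the while loop (cited by the ports' decreasing_by)
theorem pvRemoveLen {xs ys : List Int} {v : Int} (h : PySem.List.remove? xs v = some ys) :
    ys.length < xs.length := by
  have hv : v ∈ xs := by
    by_contra hv
    rw [(PySem.List.remove?_eq_none_iff xs v).mpr hv] at h
    exact absurd h (by simp)
  rw [PySem.List.remove?_eq_some_erase xs v hv] at h
  cases h
  exact List.length_erase_of_mem hv ▸ Nat.sub_lt (List.length_pos_of_mem hv) Nat.one_pos

-- the 'for t in range(T)' loop; none = the early 'return -1'
def listenLoop1 : Nat → List Int → List Int → Int → Int → Option (List Int × List Int × Int × Int)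
  | 0, d1, d2, remain, ans => some (d1, d2, remain, ans)
  | t + 1, d1, d2, remain, ans =>
    if d1.length ≤ 0 ∨ d2.length ≤ 0 then none
    else
      match PySem.List.min? d1 (fun x => x), PySem.List.min? d2 (fun x => x) with
      | some s1, some s2 =>
        let remain' := remain - (s1 + s2)
        let ans' := ans + 2
        if remain' < 0 then none
        else
          match PySem.List.remove? d1 s1, PySem.List.remove? d2 s2 with
          | some d1', some d2' => listenLoop1 t d1' d2' remain' ans'
          | _, _ => none  -- unreachable: min? guarantees membership
      | _, _ => none      -- unreachable: the lists are nonempty here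

-- the trailing 'while len(d1) > 0' loop
def listenLoop2 (d1 : List Int) (remain ans : Int) : Int :=
  if d1.length > 0 then
    match _h1 : PySem.List.min? d1 (fun x => x) with
    | none => ans   -- unreachable: d1 is nonempty
    | some s1 =>
      let remain' := remain - s1
      if remain' < 0 then ans
      else
        match h2 : PySem.List.remove? d1 s1 with
        | none => ans -- unreachable: s1 ∈ d1
        | some d1' => listenLoop2 d1' remain' (ans + 1)
  else ans
termination_by d1.length
decreasing_by exact pvRemoveLen h2

def listen (durations1 : List Int) (durations2 : List Int) (minutes : Int) (T : Int) : Int :=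
  match listenLoop1 T.toNat durations1 durations2 (minutes * 60) 0 with
  | none => -1
  | some (d1, d2, remain, ans) => listenLoop2 (d1 ++ d2) remain ans

-- ===== PORT B =====

-- the 'for a, b in zip(...)' loop; none = the early 'return -1'
def pairsLoop : List (Int × Int) → Int → Option Int
  | [], remain => some remain
  | (a, b) :: rest, remain =>
    let r := remain - (a + b)
    if r < 0 then none else pairsLoop rest r

-- the 'for d in sorted(...)' loop
def tailLoop : List Int → Int → Int → Int
  | [], _, ans => ans
  | d :: rest, remain, ans =>
    if remain - d < 0 then ans else tailLoop rest (remain - d) (ans + 1)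

def listen_alt (durations1 : List Int) (durations2 : List Int) (minutes : Int) (T : Int) : Int :=
  let s1 := PySem.List.sorted durations1 (fun x => x) false
  let s2 := PySem.List.sorted durations2 (fun x => x) false
  let n := T.toNat   -- n = max(T, 0)
  if s1.length < n ∨ s2.length < n then -1
  else
    match pairsLoop ((s1.take n).zip (s2.take n)) (minutes * 60) with
    | none => -1
    | some remain =>
      tailLoop (PySem.List.sorted (s1.drop n ++ s2.drop n) (fun x => x) false) remain (2 * (n : Int))

-- ===== PRECONDITION & SPEC =====
def Spec_listen (durations1 : List Int) (durations2 : List Int) (minutes : Int) (T : Int) (out : Int) : Prop := out = listen_alt durations1 durations2 minutes T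
instance (durations1 : List Int) (durations2 : List Int) (minutes : Int) (T : Int) (out : Int) : Decidable (Spec_listen durations1 durations2 minutes T out) := by unfold Spec_listen; infer_instance

-- ===== CLAIM (what is proved, stated in full; the proofs are below) =====
def Claim_equal_listen : Prop := ∀ (durations1 : List Int) (durations2 : List Int) (minutes : Int) (T : Int), Dom_listen durations1 durations2 minutes T → Spec_listen durations1 durations2 minutes T (listen durations1 durations2 minutes T)

-- ===== LEMMAS AND PROOFS =====

-- head of sorted(xs) is min(xs)
theorem pvMinHead {xs : List Int} {m : Int} {rest : List Int}
    (h : PySem.List.sorted xs (fun x => x) false = m :: rest) :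
    PySem.List.min? xs (fun x => x) = some m := by
  have hne : xs ≠ [] := by
    intro hx; rw [hx] at h; simp [PySem.List.sorted] at h
  obtain ⟨m', hm'⟩ : ∃ m', PySem.List.min? xs (fun x => x) = some m' := by
    cases hmin : PySem.List.min? xs (fun x => x) with
    | none => exact absurd ((PySem.List.min?_eq_none_iff xs (fun x => x)).mp hmin) hne
    | some v => exact ⟨v, rfl⟩
  have h1 : m' ∈ xs := PySem.List.min?_mem hm'
  have h2 : ∀ y ∈ xs, m' ≤ y := PySem.List.min?_isMin hm'
  have hmem : m ∈ xs := by
    exact (PySem.List.mem_sorted xs (fun x => x) false m).mp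
      (by rw [h]; exact List.mem_cons_self ..)
  have h3 : ∀ y ∈ xs, m ≤ y := PySem.List.key_head_sorted_le xs (fun x => x) h
  rw [hm']
  exact congrArg some (le_antisymm (h2 m hmem) (h3 m' h1))

-- sorted of erase-min is the tail of sorted
theorem pvSortedErase {xs : List Int} {m : Int} {rest : List Int}
    (h : PySem.List.sorted xs (fun x => x) false = m :: rest) :
    PySem.List.sorted (xs.erase m) (fun x => x) false = rest := by
  have hperm : (m :: rest).Perm xs := h ▸ PySem.List.sorted_perm ..
  have hpermE : rest.Perm (xs.erase m) := by
    have := hperm.erase m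
    simpa using this
  have hpw : rest.Pairwise (fun a b => a ≤ b) := by
    have := PySem.List.sorted_pairwise xs (fun x => x)
    rw [h] at this
    exact this.of_cons
  exact PySem.List.sorted_id_eq_of_perm_of_pairwise (xs.erase m) rest hpermE hpw

theorem pvRemoveMin {xs : List Int} {m : Int} (h : PySem.List.min? xs (fun x => x) = some m) :
    PySem.List.remove? xs m = some (xs.erase m) :=
  PySem.List.remove?_eq_some_erase xs m (PySem.List.min?_mem h)

-- phase-1 correspondence: A's fuelled min/remove loop vs B's length check + prefix zip sweep
theorem pvLoop1 (t : Nat) (d1 d2 : List Int) (r a : Int) :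
    (listenLoop1 t d1 d2 r a).map (fun s => (PySem.List.sorted s.1 (fun x => x) false,
        PySem.List.sorted s.2.1 (fun x => x) false, s.2.2.1, s.2.2.2)) =
      (if (PySem.List.sorted d1 (fun x => x) false).length < t ∨
          (PySem.List.sorted d2 (fun x => x) false).length < t then none
       else
         match pairsLoop (((PySem.List.sorted d1 (fun x => x) false).take t).zip
             ((PySem.List.sorted d2 (fun x => x) false).take t)) r with
         | none => none
         | some r' => some ((PySem.List.sorted d1 (fun x => x) false).drop t,
             (PySem.List.sorted d2 (fun x => x) false).drop t, r', a + 2 * (t : Int))) := by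
  induction t generalizing d1 d2 r a with
  | zero => simp [listenLoop1, pairsLoop]
  | succ t ih =>
    cases hs1 : PySem.List.sorted d1 (fun x => x) false with
    | nil =>
      have hd1 : d1 = [] := (PySem.List.sorted_eq_nil_iff _ (fun x => x) false).mp hs1
      simp [listenLoop1, hd1]
    | cons x xs =>
      cases hs2 : PySem.List.sorted d2 (fun x => x) false with
      | nil =>
        have hd2 : d2 = [] := (PySem.List.sorted_eq_nil_iff _ (fun x => x) false).mp hs2
        simp [listenLoop1, hd2]
      | cons y ys =>
        have hd1ne : d1.length > 0 := by
          have := PySem.List.length_sorted d1 (fun x => x) false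
          rw [hs1] at this; simp only [List.length_cons] at this; omega
        have hd2ne : d2.length > 0 := by
          have := PySem.List.length_sorted d2 (fun x => x) false
          rw [hs2] at this; simp only [List.length_cons] at this; omega
        have hm1 := pvMinHead hs1
        have hm2 := pvMinHead hs2
        have hr1 := pvRemoveMin hm1
        have hr2 := pvRemoveMin hm2
        have he1 := pvSortedErase hs1
        have he2 := pvSortedErase hs2
        simp only [listenLoop1, hm1, hm2, hr1, hr2]
        rw [if_neg (by omega)]
        by_cases hneg : r - (x + y) < 0
        · simp [hneg, pairsLoop]
        · rw [if_neg hneg]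
          rw [ih (d1.erase x) (d2.erase y) (r - (x + y)) (a + 2)]
          rw [he1, he2]
          simp only [List.length_cons, List.take_succ_cons, List.zip_cons_cons, List.drop_succ_cons,
            pairsLoop, if_neg hneg]
          have harith : a + 2 + 2 * (t : Int) = a + 2 * ((t : Nat) + 1 : Nat) := by push_cast; ring
          by_cases hlen : xs.length < t ∨ ys.length < t
          · rw [if_pos hlen, if_pos (by omega)]
          · rw [if_neg hlen, if_neg (by omega)]
            cases pairsLoop ((xs.take t).zip (ys.take t)) (r - (x + y)) with
            | none => rfl
            | some r' => simp only [harith]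

-- phase-2 correspondence: A's while-min/remove loop vs B's sweep over the sorted list
theorem pvLoop2 (d : List Int) (r a : Int) :
    listenLoop2 d r a = tailLoop (PySem.List.sorted d (fun x => x) false) r a := by
  cases hs : PySem.List.sorted d (fun x => x) false with
  | nil =>
    have hd : d = [] := (PySem.List.sorted_eq_nil_iff _ (fun x => x) false).mp hs
    rw [hd]; simp [listenLoop2, tailLoop]
  | cons m rest =>
    have hdne : d.length > 0 := by
      have := PySem.List.length_sorted d (fun x => x) false
      rw [hs] at this; simp only [List.length_cons] at this; omega
    have hm := pvMinHead hs
    have hr := pvRemoveMin hm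
    have he := pvSortedErase hs
    rw [listenLoop2, if_pos hdne]
    split
    · next h1 => rw [hm] at h1; exact absurd h1 (by simp)
    · next s1 h1 =>
      rw [hm] at h1
      injection h1 with h1
      subst h1
      simp only [tailLoop]
      split_ifs with hneg
      · rfl
      · split
        · next h2 => rw [hr] at h2; exact absurd h2 (by simp)
        · next d1' h2 =>
          rw [hr] at h2
          injection h2 with h2
          subst h2
          rw [pvLoop2 (d.erase m) (r - m) (a + 1), he]
termination_by d.length
decreasing_by
  exact pvRemoveLen hr

-- sorting ignores the concrete order of the leftover lists
theorem pvSortedAppend {e1 e2 f1 f2 : List Int}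
    (h1 : PySem.List.sorted e1 (fun x => x) false = f1)
    (h2 : PySem.List.sorted e2 (fun x => x) false = f2) :
    PySem.List.sorted (e1 ++ e2) (fun x => x) false =
      PySem.List.sorted (f1 ++ f2) (fun x => x) false := by
  refine PySem.List.sorted_eq_sorted_of_perm _ _ _ (fun a b h => h) ?_
  exact List.Perm.append (h1 ▸ (PySem.List.sorted_perm ..).symm) (h2 ▸ (PySem.List.sorted_perm ..).symm)

-- ===== VERDICT (by name: the statement is the Claim_ definition above) =====
theorem listen_spec : Claim_equal_listen := by
  intro d1 d2 minutes T _
  unfold Spec_listen _root_.listen listen_alt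
  have h := pvLoop1 T.toNat d1 d2 (minutes * 60) 0
  by_cases hlen : (PySem.List.sorted d1 (fun x => x) false).length < T.toNat ∨
      (PySem.List.sorted d2 (fun x => x) false).length < T.toNat
  · rw [if_pos hlen] at h
    have hA : listenLoop1 T.toNat d1 d2 (minutes * 60) 0 = none := by
      cases hh : listenLoop1 T.toNat d1 d2 (minutes * 60) 0 with
      | none => rfl
      | some s => rw [hh] at h; exact absurd h (by simp)
    rw [hA, if_pos hlen]
  · rw [if_neg hlen] at h
    rw [if_neg hlen]
    cases hp : pairsLoop (((PySem.List.sorted d1 (fun x => x) false).take T.toNat).zip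
        ((PySem.List.sorted d2 (fun x => x) false).take T.toNat)) (minutes * 60) with
    | none =>
      rw [hp] at h
      have hA : listenLoop1 T.toNat d1 d2 (minutes * 60) 0 = none := by
        cases hh : listenLoop1 T.toNat d1 d2 (minutes * 60) 0 with
        | none => rfl
        | some s => rw [hh] at h; exact absurd h (by simp)
      rw [hA]
    | some r' =>
      rw [hp] at h
      cases hh : listenLoop1 T.toNat d1 d2 (minutes * 60) 0 with
      | none => rw [hh] at h; exact absurd h (by simp)
      | some s =>
        obtain ⟨e1, e2, rr, aa⟩ := s
        rw [hh] at h
        simp only [Option.map_some, Option.some.injEq, Prod.mk.injEq] at h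
        obtain ⟨hse1, hse2, hrr, haa⟩ := h
        simp only []
        rw [pvLoop2, pvSortedAppend hse1 hse2, hrr, haa, zero_add]
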